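/- GENERATED by farm/mkstatement.py from design/units.tsv (unit `start_decoder.2d`) and the assertions of Vorbis/Spec/StartDecoder2.lean — do not edit.
   THE STATEMENT of the proof unit `start_decoder.2d`: segment 2d of `start_decoder` (27 instructions; entries 0x113b15;
   exits 0x113b22; ranges 0x113b15-0x113b1d + 0x113b7a-0x113bb7 + 0x113bdc-0x113be9 + 0x113bfa-0x113c07)
   takes each of its entry assertions to one of its exit assertions (`Vorbis.Spec.StartDecoder.Seg2d`), given the contracts of its callees.
   What the names mean: Vorbis/Spec/Basic.lean (the shared hypotheses), Vorbis/Spec/StartDecoder2.lean (the assertions). The theorem to prove: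
   `theorem start_decoder_2d_ok : Vorbis.Spec.start_decoder_2d.Statement`. -/
import Vorbis.Spec.Leaves
import Vorbis.Spec.StartDecoder2
namespace Vorbis.Spec.start_decoder_2d
open X86 X86.User Asan

/-- The statement of unit `start_decoder.2d`. -/
def Statement : Prop :=
  ∀ (Lay : Layout) (_hLay : Lay.hi = 0x1000000) (μ : Microarch) (_hμ : UserX.MicroOK μ) (u₀ : State)
    (_hcode : HasCodeNat Lay u₀ Vorbis.L.start_decoder.entry Vorbis.Code.code_start_decoder.nat Vorbis.L.start_decoder.size)
    (_h_error : ∀ (others : List Obj) (frames : List (Nat × FrameLayout)), Calls Lay μ Vorbis.WayInv (Vorbis.conv u₀) Vorbis.L.error.entry (Vorbis.Spec.error.spec others frames)),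
    Vorbis.Spec.StartDecoder.Seg2d Lay μ u₀

end Vorbis.Spec.start_decoder_2d
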